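-- pv_equiv track=rewrite | github.com/Ravikumarchavva/cascadia-vlm-challenge | cluade-game.py | score_hawks
-- ===== SOURCE A (Python) =====
-- from typing import List, Dict, Tuple, Optional
--
-- def _find_connected_components(
--     tile_indices: List[int],
--     adjacency: Dict[int, List[int]],
-- ) -> List[List[int]]:
--     """
--     Given a subset of tile indices and the full adjacency graph,
--     return connected components (groups of mutually-reachable tiles).
--     """
--     remaining = set(tile_indices)
--     components = []
--     while remaining:
--         start = next(iter(remaining))
--         # BFS
--         queue   = [start]
--         visited = {start}
--         while queue:
--             node = queue.pop(0)
--             for nb in adjacency.get(node, []):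
--                 if nb in remaining and nb not in visited:
--                     visited.add(nb)
--                     queue.append(nb)
--         components.append(sorted(visited))
--         remaining -= visited
--     return components
--
-- def score_hawks(
--     animals: List[str],
--     adjacency: Dict[int, List[int]],
-- ) -> int:
--     """
--     Red-Tailed Hawk: scores per each hawk that is connected to
--     at least one other hawk and forms a chain.
--     Scoring table (from card): 2→5, 3→9, 4→12, 5→16, 6→20, 7→24, 8+→23
--     (Each hawk scores once; score is per-hawk based on total connected chain length.)
--
--     Simplified reading of card:
--         chain length → total points for that chain
--         2→5, 3→9, 4→12, 5→16, 6→20, 7→24, 8+→23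
--     """
--     HAWK_CHAIN_SCORES = {2: 5, 3: 9, 4: 12, 5: 16, 6: 20, 7: 24}
--     # 8+ → 23 (cap)
--     hawk_indices = [i for i, a in enumerate(animals) if a == "hawk"]
--     if not hawk_indices:
--         return 0
--
--     components = _find_connected_components(hawk_indices, adjacency)
--     score = 0
--     for comp in components:
--         size = len(comp)
--         if size < 2:
--             continue  # isolated hawks don't score
--         if size >= 8:
--             score += 23
--         elif size in HAWK_CHAIN_SCORES:
--             score += HAWK_CHAIN_SCORES[size]
--     return score
-- ===== SOURCE B (Python) =====
-- def score_hawks(animals, adjacency):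
--     # Round-based fixpoint saturation (naive closure) instead of a worklist
--     # traversal: no queue, no frontier, each component is grown by repeated
--     # whole-set passes until no change; scoring is done inline per component.
--     table = {2: 5, 3: 9, 4: 12, 5: 16, 6: 20, 7: 24}
--     hawks = [i for i, a in enumerate(animals) if a == "hawk"]
--     done = set()
--     total = 0
--     for start in hawks:
--         if start in done:
--             continue
--         allowed = {h for h in hawks if h not in done}
--         comp = {start}
--         changed = True
--         while changed:
--             changed = False
--             for u in list(comp):
--                 for nb in adjacency.get(u, []):
--                     if nb in allowed and nb not in comp:
--                         comp.add(nb)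
--                         changed = True
--         done |= comp
--         n = len(comp)
--         total += 23 if n >= 8 else table.get(n, 0)
--     return total
-- ===== Notes on version B (the rewrite author's own statement) =====
-- stated objective: alternative
-- what changed: Replaces the worklist BFS (queue.pop(0), visited set, sorted component lists, while-over-remaining-set) by round-based fixpoint saturation: iterate the hawk list in order, grow each component by whole-set passes until no pass adds a node, and score inline with table.get; correct because the saturated set is exactly the set A's BFS visits (forward reachability inside the not-yet-assigned hawks).
import Mathlib
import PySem

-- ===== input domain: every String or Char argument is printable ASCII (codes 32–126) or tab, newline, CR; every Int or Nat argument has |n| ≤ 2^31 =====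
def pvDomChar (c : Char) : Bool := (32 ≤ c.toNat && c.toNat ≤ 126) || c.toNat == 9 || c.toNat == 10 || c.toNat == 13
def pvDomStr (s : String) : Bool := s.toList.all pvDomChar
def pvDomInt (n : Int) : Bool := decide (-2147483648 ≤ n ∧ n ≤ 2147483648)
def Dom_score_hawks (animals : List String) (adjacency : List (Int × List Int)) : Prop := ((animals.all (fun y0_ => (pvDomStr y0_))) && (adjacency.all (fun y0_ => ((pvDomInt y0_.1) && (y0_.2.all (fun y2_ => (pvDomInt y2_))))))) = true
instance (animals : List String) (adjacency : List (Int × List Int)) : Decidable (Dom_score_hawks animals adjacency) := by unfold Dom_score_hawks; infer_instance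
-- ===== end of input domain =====

-- B replaces A's worklist BFS (queue.pop(0) + visited set + sorted component
-- lists + while-over-remaining-set) by round-based fixpoint saturation: it
-- walks the hawk list in order, grows each component by whole-set passes until
-- a pass adds nothing, and scores inline (objective: alternative; not faster).
-- Both ports model the Python sets of hawk indices as lists of their distinct
-- elements: 'remaining'/'allowed' as the ascending list of indices (exact for
-- these small non-negative index sets, which CPython iterates in ascending
-- order) and B's growing 'comp' in insertion order — the saturated set, hence
-- its size and the score, does not depend on that traversal order.

-- ===== PORT A =====
-- BFS of _find_connected_components: queue popped at the FRONT, neighbours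
-- appended at the back; fuel bounds the number of pops (each pop is matched by
-- a distinct element of `remaining` entering `visited`, so it never runs out).
def pvBfsA (adjacency : List (Int × List Int)) (remaining : List Int) :
    Nat → List Int → List Int → List Int
  | 0, _, visited => visited
  | _ + 1, [], visited => visited
  | fuel + 1, node :: queue, visited =>
      let s := (PySem.Dict.getD (PySem.Dict.mk adjacency) node []).foldl
        (fun s nb => if nb ∈ remaining ∧ nb ∉ s.2 then (s.1 ++ [nb], s.2 ++ [nb]) else s)
        (queue, visited)
      pvBfsA adjacency remaining fuel s.1 s.2

-- the `while remaining:` loop of _find_connected_components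
def pvFccA (adjacency : List (Int × List Int)) : Nat → List Int → List (List Int)
  | 0, _ => []
  | _ + 1, [] => []
  | fuel + 1, start :: rest =>
      let visited := pvBfsA adjacency (start :: rest) (rest.length + 1) [start] [start]
      PySem.List.sorted visited (fun x => x) false
        :: pvFccA adjacency fuel ((start :: rest).filter (fun x => decide (x ∉ visited)))

def score_hawks (animals : List String) (adjacency : List (Int × List Int)) : Int :=
  let hawkChainScores : List (Int × Int) := [(2, 5), (3, 9), (4, 12), (5, 16), (6, 20), (7, 24)]
  let hawkIndices : List Int :=
    ((PySem.List.enumerate animals 0).filter (fun p => p.2 == "hawk")).map (fun p => p.1)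
  if hawkIndices = [] then 0
  else
    let components := pvFccA adjacency hawkIndices.length hawkIndices
    components.foldl
      (fun score comp =>
        let size : Int := (comp.length : Int)
        if size < 2 then score
        else if 8 ≤ size then score + 23
        else
          match PySem.Dict.get? (PySem.Dict.mk hawkChainScores) size with
          | some v => score + v
          | none => score)
      0

-- ===== PORT B =====
def pvTable : List (Int × Int) := [(2, 5), (3, 9), (4, 12), (5, 16), (6, 20), (7, 24)]

-- one `for u in list(comp)` pass of Source B: state = (comp, changed)
def pvSatStepB (a : List (Int × List Int)) (allowed comp : List Int) : List Int × Bool :=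
  comp.foldl
    (fun s u =>
      (PySem.Dict.getD (PySem.Dict.mk a) u []).foldl
        (fun s nb => if nb ∈ allowed ∧ nb ∉ s.1 then (s.1 ++ [nb], true) else s) s)
    (comp, false)

-- Source B's `while changed:` saturation loop; fuel bounds the rounds (every round
-- that continues has added at least one element of `allowed`, so it suffices).
def pvSatB (a : List (Int × List Int)) (allowed : List Int) : Nat → List Int → List Int
  | 0, comp => comp
  | f + 1, comp =>
      let s := pvSatStepB a allowed comp
      if s.2 then pvSatB a allowed f s.1 else s.1

-- Source B's `for start in hawks:` loop
def pvOuterB (a : List (Int × List Int)) (hawks : List Int) :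
    List Int → List Int → Int → Int
  | [], _, total => total
  | h :: rest, done, total =>
      if h ∈ done then pvOuterB a hawks rest done total
      else
        let allowed := hawks.filter (fun x => decide (x ∉ done))
        let comp := pvSatB a allowed allowed.length [h]
        let n : Int := (comp.length : Int)
        pvOuterB a hawks rest (done ++ comp.filter (fun x => decide (x ∉ done)))
          (total + if 8 ≤ n then 23 else PySem.Dict.getD (PySem.Dict.mk pvTable) n 0)

def score_hawks_alt (animals : List String) (adjacency : List (Int × List Int)) : Int :=
  let hawks : List Int :=
    ((PySem.List.enumerate animals 0).filter (fun p => p.2 == "hawk")).map (fun p => p.1)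
  pvOuterB adjacency hawks hawks [] 0

-- ===== PRECONDITION & SPEC =====
def Spec_score_hawks (animals : List String) (adjacency : List (Int × List Int)) (out : Int) : Prop := out = score_hawks_alt animals adjacency
instance (animals : List String) (adjacency : List (Int × List Int)) (out : Int) : Decidable (Spec_score_hawks animals adjacency out) := by unfold Spec_score_hawks; infer_instance

-- ===== CLAIM (what is proved, stated in full; the proofs are below) =====
def Claim_equal_score_hawks : Prop := ∀ (animals : List String) (adjacency : List (Int × List Int)), Dom_score_hawks animals adjacency → Spec_score_hawks animals adjacency (score_hawks animals adjacency)

-- ===== LEMMAS AND PROOFS =====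

-- A's BFS as an instance of a generic worklist traversal (push = append).
def pvTrav (adjacency : List (Int × List Int)) (remaining : List Int)
    (push : List Int → Int → List Int) : Nat → List Int → List Int → List Int
  | 0, _, vis => vis
  | _ + 1, [], vis => vis
  | fuel + 1, node :: q, vis =>
      let s := (PySem.Dict.getD (PySem.Dict.mk adjacency) node []).foldl
        (fun s nb => if nb ∈ remaining ∧ nb ∉ s.2 then (push s.1 nb, s.2 ++ [nb]) else s)
        (q, vis)
      pvTrav adjacency remaining push fuel s.1 s.2

theorem pvBfsA_eq_trav (a : List (Int × List Int)) (r : List Int) :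
    ∀ (f : Nat) (q vis : List Int),
      pvBfsA a r f q vis = pvTrav a r (fun q x => q ++ [x]) f q vis := by
  intro f
  induction f with
  | zero => intro q vis; rfl
  | succ f ih =>
      intro q vis
      cases q with
      | nil => rfl
      | cons node q => simp only [pvBfsA, pvTrav]; exact ih _ _

-- Reachability from `start` along adjacency edges landing inside `remaining`.
inductive pvReach (a : List (Int × List Int)) (r : List Int) (start : Int) : Int → Prop
  | base : pvReach a r start start
  | step {x nb : Int} : pvReach a r start x → nb ∈ PySem.Dict.getD (PySem.Dict.mk a) x [] → nb ∈ r →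
      pvReach a r start nb

theorem pvFold_spec (a : List (Int × List Int)) (r : List Int)
    (push : List Int → Int → List Int)
    (hmem : ∀ q x y, y ∈ push q x ↔ y = x ∨ y ∈ q)
    (hlen : ∀ q x, (push q x).length = q.length + 1) :
    ∀ (nbs q vis : List Int), vis.Nodup →
      ∃ new : List Int,
        (nbs.foldl (fun s nb => if nb ∈ r ∧ nb ∉ s.2 then (push s.1 nb, s.2 ++ [nb]) else s)
            (q, vis)).2 = vis ++ new ∧
        (vis ++ new).Nodup ∧
        (∀ y ∈ new, y ∈ nbs ∧ y ∈ r ∧ y ∉ vis) ∧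
        ((nbs.foldl (fun s nb => if nb ∈ r ∧ nb ∉ s.2 then (push s.1 nb, s.2 ++ [nb]) else s)
            (q, vis)).1).length = q.length + new.length ∧
        (∀ y, y ∈ (nbs.foldl (fun s nb => if nb ∈ r ∧ nb ∉ s.2 then (push s.1 nb, s.2 ++ [nb]) else s)
            (q, vis)).1 ↔ y ∈ q ∨ y ∈ new) ∧
        (∀ nb ∈ nbs, nb ∈ r → nb ∈ vis ++ new) := by
  intro nbs
  induction nbs with
  | nil =>
      intro q vis hnd
      exact ⟨[], by simp, by simpa using hnd, by simp, by simp, by simp, by simp⟩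
  | cons nb nbs ih =>
      intro q vis hnd
      by_cases h : nb ∈ r ∧ nb ∉ vis
      · have hstep : (List.foldl (fun s nb => if nb ∈ r ∧ nb ∉ s.2 then (push s.1 nb, s.2 ++ [nb]) else s)
            (q, vis) (nb :: nbs))
            = List.foldl (fun s nb => if nb ∈ r ∧ nb ∉ s.2 then (push s.1 nb, s.2 ++ [nb]) else s)
              (push q nb, vis ++ [nb]) nbs := by
          simp [List.foldl_cons, h]
        have hnd' : (vis ++ [nb]).Nodup := by
          refine List.Nodup.append hnd (List.nodup_singleton nb) ?_
          intro y hy hy'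
          rw [List.mem_singleton] at hy'
          subst hy'
          exact h.2 hy
        obtain ⟨new', h1, h2, h3, h4, h5, h6⟩ := ih (push q nb) (vis ++ [nb]) hnd'
        refine ⟨nb :: new', ?_, ?_, ?_, ?_, ?_, ?_⟩
        · rw [hstep, h1]; simp
        · have : vis ++ nb :: new' = (vis ++ [nb]) ++ new' := by simp
          rw [this]; exact h2
        · intro y hy
          rcases List.mem_cons.mp hy with rfl | hy
          · exact ⟨List.mem_cons_self .., h.1, h.2⟩
          · obtain ⟨ha, hb, hc⟩ := h3 y hy
            exact ⟨List.mem_cons_of_mem _ ha, hb, fun hv => hc (List.mem_append_left _ hv)⟩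
        · rw [hstep, h4, hlen]
          simp
          omega
        · intro y
          rw [hstep]
          rw [h5 y, hmem]
          simp only [List.mem_cons]
          tauto
        · intro m hm hmr
          rcases List.mem_cons.mp hm with rfl | hm
          · have : m ∈ vis ++ [m] := by simp
            have := List.mem_append_left new' this
            simpa using this
          · have := h6 m hm hmr
            simpa using this
      · have hstep : (List.foldl (fun s nb => if nb ∈ r ∧ nb ∉ s.2 then (push s.1 nb, s.2 ++ [nb]) else s)
            (q, vis) (nb :: nbs))
            = List.foldl (fun s nb => if nb ∈ r ∧ nb ∉ s.2 then (push s.1 nb, s.2 ++ [nb]) else s)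
              (q, vis) nbs := by
          simp [List.foldl_cons, h]
        obtain ⟨new', h1, h2, h3, h4, h5, h6⟩ := ih q vis hnd
        refine ⟨new', ?_, h2, ?_, ?_, ?_, ?_⟩
        · rw [hstep]; exact h1
        · intro y hy
          obtain ⟨ha, hb, hc⟩ := h3 y hy
          exact ⟨List.mem_cons_of_mem _ ha, hb, hc⟩
        · rw [hstep]; exact h4
        · intro y; rw [hstep]; exact h5 y
        · intro m hm hmr
          rcases List.mem_cons.mp hm with rfl | hm
          · have hmv : m ∈ vis := by
              by_contra hmv
              exact h ⟨hmr, hmv⟩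
            exact List.mem_append_left _ hmv
          · exact h6 m hm hmr

theorem pvFilter_out_one (r : List Int) (n : Int) :
    ∀ (vis : List Int), r.Nodup → n ∈ r → n ∉ vis →
      (r.filter (fun y => decide (y ∉ vis))).length
        = (r.filter (fun y => decide (y ∉ vis ++ [n]))).length + 1 := by
  induction r with
  | nil => intro vis _ hn _; simp at hn
  | cons a t ih =>
      intro vis hnd hn hnv
      have hat : a ∉ t := (List.nodup_cons.mp hnd).1
      have htnd : t.Nodup := (List.nodup_cons.mp hnd).2
      by_cases han : a = n
      · subst han
        have htail : t.filter (fun y => decide (y ∉ vis ++ [a])) = t.filter (fun y => decide (y ∉ vis)) := by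
          apply List.filter_congr
          intro y hy
          have hya : y ≠ a := fun hya => hat (hya ▸ hy)
          simp [List.mem_append, hya]
        simp only [List.filter_cons]
        have h1 : (decide (a ∉ vis)) = true := by simpa using hnv
        have h2 : (decide (a ∉ vis ++ [a])) = false := by simp
        rw [h1, h2, htail]
        simp
      · have hnt : n ∈ t := by
          rcases List.mem_cons.mp hn with h | h
          · exact absurd h.symm han
          · exact h
        have hhead : (decide (a ∉ vis ++ [n])) = (decide (a ∉ vis)) := by
          simp [List.mem_append, han]
        cases hd : decide (a ∉ vis) with
        | false =>
            simp only [List.filter_cons, hhead, hd, Bool.false_eq_true, if_false]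
            exact ih vis htnd hnt hnv
        | true =>
            simp only [List.filter_cons, hhead, hd, if_true, List.length_cons]
            rw [ih vis htnd hnt hnv]

theorem pvFilter_drop (r : List Int) :
    ∀ (new vis : List Int), r.Nodup → (vis ++ new).Nodup → (∀ y ∈ new, y ∈ r ∧ y ∉ vis) →
      (r.filter (fun y => decide (y ∉ vis))).length
        = (r.filter (fun y => decide (y ∉ vis ++ new))).length + new.length := by
  intro new
  induction new with
  | nil => intro vis _ _ _; simp
  | cons n ns ih =>
      intro vis hr hnd hin
      have hn : n ∈ r ∧ n ∉ vis := ⟨(hin n (List.mem_cons_self ..)).1, (hin n (List.mem_cons_self ..)).2⟩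
      have hassoc : vis ++ n :: ns = (vis ++ [n]) ++ ns := by simp
      have hnd' : ((vis ++ [n]) ++ ns).Nodup := by rw [← hassoc]; exact hnd
      have hin' : ∀ y ∈ ns, y ∈ r ∧ y ∉ vis ++ [n] := by
        intro y hy
        refine ⟨(hin y (List.mem_cons_of_mem _ hy)).1, ?_⟩
        intro hyv
        rcases List.mem_append.mp hyv with h | h
        · exact (hin y (List.mem_cons_of_mem _ hy)).2 h
        · rw [List.mem_singleton] at h
          subst h
          have := List.Nodup.sublist (by simp : (y :: ns).Sublist (vis ++ y :: ns)) hnd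
          exact (List.nodup_cons.mp this).1 hy
      have step := pvFilter_out_one r n vis hr hn.1 hn.2
      have hrec := ih (vis ++ [n]) hr hnd' hin'
      have hfil : List.filter (fun y => decide (y ∉ (vis ++ [n]) ++ ns)) r
          = List.filter (fun y => decide (y ∉ vis ++ n :: ns)) r := by
        apply List.filter_congr
        intro y _
        rw [← hassoc]
      rw [step, hrec, hfil]
      simp only [List.length_cons]
      omega

theorem pvTrav_spec (a : List (Int × List Int)) (r : List Int) (start : Int)
    (push : List Int → Int → List Int)
    (hmem : ∀ q x y, y ∈ push q x ↔ y = x ∨ y ∈ q)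
    (hlen : ∀ q x, (push q x).length = q.length + 1) :
    ∀ (f : Nat) (q vis : List Int), r.Nodup → vis.Nodup →
      (∀ x ∈ q, x ∈ vis) →
      (∀ x ∈ vis, pvReach a r start x) →
      (∀ x ∈ vis, x ∉ q → ∀ nb ∈ PySem.Dict.getD (PySem.Dict.mk a) x [], nb ∈ r → nb ∈ vis) →
      q.length + (r.filter (fun y => decide (y ∉ vis))).length ≤ f →
      (pvTrav a r push f q vis).Nodup ∧
      (∀ x ∈ vis, x ∈ pvTrav a r push f q vis) ∧
      (∀ x ∈ pvTrav a r push f q vis, pvReach a r start x) ∧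
      (∀ x ∈ pvTrav a r push f q vis, ∀ nb ∈ PySem.Dict.getD (PySem.Dict.mk a) x [], nb ∈ r →
        nb ∈ pvTrav a r push f q vis) := by
  intro f
  induction f with
  | zero =>
      intro q vis hr hnd hqv hreach hcl hfuel
      have hq : q = [] := by
        cases q with
        | nil => rfl
        | cons _ _ => simp at hfuel
      subst hq
      refine ⟨hnd, fun x hx => hx, hreach, ?_⟩
      intro x hx nb hnb hnbr
      exact hcl x hx (by simp) nb hnb hnbr
  | succ f ih =>
      intro q vis hr hnd hqv hreach hcl hfuel
      cases q with
      | nil =>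
          refine ⟨hnd, fun x hx => hx, hreach, ?_⟩
          intro x hx nb hnb hnbr
          exact hcl x hx (by simp) nb hnb hnbr
      | cons node q' =>
          obtain ⟨new, h1, h2, h3, h4, h5, h6⟩ :=
            pvFold_spec a r push hmem hlen (PySem.Dict.getD (PySem.Dict.mk a) node []) q' vis hnd
          set s := (PySem.Dict.getD (PySem.Dict.mk a) node []).foldl
            (fun s nb => if nb ∈ r ∧ nb ∉ s.2 then (push s.1 nb, s.2 ++ [nb]) else s) (q', vis) with hs
          have hstep : pvTrav a r push (f + 1) (node :: q') vis = pvTrav a r push f s.1 s.2 := by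
            simp only [pvTrav]
            rw [hs]
          have hnode : node ∈ vis := hqv node (by simp)
          have hnd2 : s.2.Nodup := by rw [h1]; exact h2
          have hq2 : ∀ x ∈ s.1, x ∈ s.2 := by
            intro x hx
            rcases (h5 x).mp hx with h | h
            · rw [h1]; exact List.mem_append_left _ (hqv x (List.mem_cons_of_mem _ h))
            · rw [h1]; exact List.mem_append_right _ h
          have hreach2 : ∀ x ∈ s.2, pvReach a r start x := by
            intro x hx
            rw [h1] at hx
            rcases List.mem_append.mp hx with h | h
            · exact hreach x h
            · obtain ⟨ha, hb, _⟩ := h3 x h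
              exact pvReach.step (hreach node hnode) ha hb
          have hcl2 : ∀ x ∈ s.2, x ∉ s.1 → ∀ nb ∈ PySem.Dict.getD (PySem.Dict.mk a) x [], nb ∈ r → nb ∈ s.2 := by
            intro x hx hxq nb hnb hnbr
            rw [h1] at hx ⊢
            rcases List.mem_append.mp hx with h | h
            · by_cases hxn : x = node
              · subst hxn
                exact h6 nb hnb hnbr
              · have hxq' : x ∉ node :: q' := by
                  intro hmem'
                  rcases List.mem_cons.mp hmem' with h' | h'
                  · exact hxn h'
                  · exact hxq ((h5 x).mpr (Or.inl h'))
                exact List.mem_append_left _ (hcl x h hxq' nb hnb hnbr)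
            · exact absurd ((h5 x).mpr (Or.inr h)) hxq
          have hfuel2 : s.1.length + (r.filter (fun y => decide (y ∉ s.2))).length ≤ f := by
            have hdrop := pvFilter_drop r new vis hr (h1 ▸ hnd2) (fun y hy => ⟨(h3 y hy).2.1, (h3 y hy).2.2⟩)
            rw [h4, h1]
            simp only [List.length_cons] at hfuel
            omega
          rw [hstep]
          obtain ⟨c1, c2, c3, c4⟩ := ih s.1 s.2 hr hnd2 hq2 hreach2 hcl2 hfuel2
          exact ⟨c1, fun x hx => c2 x (by rw [h1]; exact List.mem_append_left _ hx), c3, c4⟩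

theorem pvTrav_char (a : List (Int × List Int)) (start : Int) (rest : List Int)
    (push : List Int → Int → List Int)
    (hmem : ∀ q x y, y ∈ push q x ↔ y = x ∨ y ∈ q)
    (hlen : ∀ q x, (push q x).length = q.length + 1)
    (hnd : (start :: rest).Nodup) :
    (pvTrav a (start :: rest) push (rest.length + 1) [start] [start]).Nodup ∧
    (∀ x, x ∈ pvTrav a (start :: rest) push (rest.length + 1) [start] [start] ↔
      pvReach a (start :: rest) start x) := by
  have hfuel : (1 : Nat) + ((start :: rest).filter (fun y => decide (y ∉ ([start] : List Int)))).length
      ≤ rest.length + 1 := by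
    have : ((start :: rest).filter (fun y => decide (y ∉ ([start] : List Int)))).length ≤ rest.length := by
      simp only [List.filter_cons]
      simp only [List.mem_singleton, decide_not, decide_true, Bool.not_true, Bool.false_eq_true,
        if_false]
      exact List.length_filter_le _ _
    omega
  obtain ⟨c1, c2, c3, c4⟩ := pvTrav_spec a (start :: rest) start push hmem hlen
    (rest.length + 1) [start] [start] hnd (List.nodup_singleton start)
    (fun x hx => hx)
    (by intro x hx; rw [List.mem_singleton] at hx; subst hx; exact pvReach.base)
    (by intro x hx hx'; exact absurd hx hx')
    (by simpa using hfuel)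
  refine ⟨c1, fun x => ⟨c3 x, ?_⟩⟩
  intro hx
  induction hx with
  | base => exact c2 start (List.mem_singleton.mpr rfl)
  | step hr hadj hmem2 ihr => exact c4 _ ihr _ hadj hmem2

-- visited only grows: the fold's second component extends vis
theorem pvFold_vis_prefix (a : List (Int × List Int)) (r : List Int)
    (push : List Int → Int → List Int) :
    ∀ (nbs q vis : List Int), ∃ new,
      (nbs.foldl (fun s nb => if nb ∈ r ∧ nb ∉ s.2 then (push s.1 nb, s.2 ++ [nb]) else s)
          (q, vis)).2 = vis ++ new := by
  intro nbs
  induction nbs with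
  | nil => intro q vis; exact ⟨[], by simp⟩
  | cons nb nbs ih =>
      intro q vis
      by_cases h : nb ∈ r ∧ nb ∉ vis
      · obtain ⟨new, hnew⟩ := ih (push q nb) (vis ++ [nb])
        refine ⟨[nb] ++ new, ?_⟩
        simp only [List.foldl_cons, if_pos h]
        rw [hnew]
        simp
      · obtain ⟨new, hnew⟩ := ih q vis
        exact ⟨new, by simp only [List.foldl_cons, if_neg h]; exact hnew⟩

theorem pvTrav_mono (a : List (Int × List Int)) (r : List Int)
    (push : List Int → Int → List Int) :
    ∀ (f : Nat) (q vis : List Int), ∃ new, pvTrav a r push f q vis = vis ++ new := by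
  intro f
  induction f with
  | zero => intro q vis; exact ⟨[], by simp [pvTrav]⟩
  | succ f ih =>
      intro q vis
      cases q with
      | nil => exact ⟨[], by simp [pvTrav]⟩
      | cons node q' =>
          obtain ⟨n1, h1⟩ := pvFold_vis_prefix a r push
            (PySem.Dict.getD (PySem.Dict.mk a) node []) q' vis
          set s := (PySem.Dict.getD (PySem.Dict.mk a) node []).foldl
            (fun s nb => if nb ∈ r ∧ nb ∉ s.2 then (push s.1 nb, s.2 ++ [nb]) else s) (q', vis)
          obtain ⟨n2, h2⟩ := ih s.1 s.2
          refine ⟨n1 ++ n2, ?_⟩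
          show pvTrav a r push f s.1 s.2 = vis ++ (n1 ++ n2)
          rw [h2, h1, List.append_assoc]

-- fuel irrelevance for A's peel loop
theorem pvFccA_fuel (a : List (Int × List Int)) :
    ∀ (n f : Nat) (r : List Int), r.length ≤ n → r.length ≤ f →
      pvFccA a f r = pvFccA a r.length r := by
  intro n
  induction n with
  | zero =>
      intro f r hn _
      have : r = [] := List.length_eq_zero_iff.mp (Nat.le_zero.mp hn)
      subst this
      cases f <;> rfl
  | succ n ih =>
      intro f r hn hf
      cases r with
      | nil => cases f <;> rfl
      | cons start rest =>
          cases f with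
          | zero => simp at hf
          | succ f =>
              simp only [List.length_cons] at hn hf ⊢
              simp only [pvFccA]
              have hstart : start ∈ pvBfsA a (start :: rest) (rest.length + 1) [start] [start] := by
                rw [pvBfsA_eq_trav]
                obtain ⟨new, hnew⟩ := pvTrav_mono a (start :: rest) (fun q x => q ++ [x])
                  (rest.length + 1) [start] [start]
                rw [hnew]
                simp
              have hrem : (start :: rest).filter
                  (fun x => decide (x ∉ pvBfsA a (start :: rest) (rest.length + 1) [start] [start]))
                  = rest.filter
                  (fun x => decide (x ∉ pvBfsA a (start :: rest) (rest.length + 1) [start] [start])) := by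
                simp only [List.filter_cons]
                rw [decide_eq_false (by simpa using hstart)]
                simp
              rw [hrem]
              have hlen : (rest.filter
                  (fun x => decide (x ∉ pvBfsA a (start :: rest) (rest.length + 1) [start] [start]))).length
                  ≤ rest.length := List.length_filter_le _ _
              rw [ih f _ (le_trans hlen (by omega)) (le_trans hlen (by omega)),
                ih rest.length _ (le_trans hlen (by omega)) hlen]

-- B's inner neighbour pass
theorem pvSatInner_spec (allowed : List Int) :
    ∀ (nbs c : List Int) (b : Bool), c.Nodup →
      ∃ new : List Int,
        (nbs.foldl (fun s nb => if nb ∈ allowed ∧ nb ∉ s.1 then (s.1 ++ [nb], true) else s) (c, b))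
          = (c ++ new, b || !new.isEmpty) ∧
        (c ++ new).Nodup ∧
        (∀ y ∈ new, y ∈ allowed ∧ y ∈ nbs) ∧
        (∀ nb ∈ nbs, nb ∈ allowed → nb ∈ c ++ new) := by
  intro nbs
  induction nbs with
  | nil =>
      intro c b hnd
      exact ⟨[], by simp, by simpa using hnd, by simp, by simp⟩
  | cons nb nbs ih =>
      intro c b hnd
      by_cases h : nb ∈ allowed ∧ nb ∉ c
      · have hnd' : (c ++ [nb]).Nodup := by
          refine List.Nodup.append hnd (List.nodup_singleton nb) ?_
          intro y hy hy'
          rw [List.mem_singleton] at hy'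
          subst hy'
          exact h.2 hy
        obtain ⟨new', h1, h2, h3, h4⟩ := ih (c ++ [nb]) true hnd'
        refine ⟨nb :: new', ?_, ?_, ?_, ?_⟩
        · simp only [List.foldl_cons, if_pos h]
          rw [h1]
          simp
        · have : c ++ nb :: new' = (c ++ [nb]) ++ new' := by simp
          rw [this]; exact h2
        · intro y hy
          rcases List.mem_cons.mp hy with rfl | hy
          · exact ⟨h.1, List.mem_cons_self ..⟩
          · exact ⟨(h3 y hy).1, List.mem_cons_of_mem _ (h3 y hy).2⟩
        · intro m hm hma
          rcases List.mem_cons.mp hm with rfl | hm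
          · simp
          · have := h4 m hm hma
            simpa using this
      · obtain ⟨new', h1, h2, h3, h4⟩ := ih c b hnd
        refine ⟨new', ?_, h2, ?_, ?_⟩
        · simp only [List.foldl_cons, if_neg h]
          exact h1
        · intro y hy
          exact ⟨(h3 y hy).1, List.mem_cons_of_mem _ (h3 y hy).2⟩
        · intro m hm hma
          rcases List.mem_cons.mp hm with rfl | hm
          · have hmc : m ∈ c := by
              by_contra hmc
              exact h ⟨hma, hmc⟩
            exact List.mem_append_left _ hmc
          · exact h4 m hm hma

-- B's whole-set pass
theorem pvSatOuter_spec (a : List (Int × List Int)) (allowed : List Int) :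
    ∀ (us c : List Int) (b : Bool), c.Nodup →
      ∃ new : List Int,
        (us.foldl
            (fun s u => (PySem.Dict.getD (PySem.Dict.mk a) u []).foldl
              (fun s nb => if nb ∈ allowed ∧ nb ∉ s.1 then (s.1 ++ [nb], true) else s) s)
            (c, b))
          = (c ++ new, b || !new.isEmpty) ∧
        (c ++ new).Nodup ∧
        (∀ y ∈ new, y ∈ allowed ∧ ∃ u ∈ us, y ∈ PySem.Dict.getD (PySem.Dict.mk a) u []) ∧
        (∀ u ∈ us, u ∈ c → ∀ nb ∈ PySem.Dict.getD (PySem.Dict.mk a) u [], nb ∈ allowed → nb ∈ c ++ new) := by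
  intro us
  induction us with
  | nil =>
      intro c b hnd
      exact ⟨[], by simp, by simpa using hnd, by simp, by simp⟩
  | cons u us ih =>
      intro c b hnd
      obtain ⟨n1, h1, h2, h3, h4⟩ :=
        pvSatInner_spec allowed (PySem.Dict.getD (PySem.Dict.mk a) u []) c b hnd
      obtain ⟨n2, g1, g2, g3, g4⟩ := ih (c ++ n1) (b || !n1.isEmpty) h2
      refine ⟨n1 ++ n2, ?_, ?_, ?_, ?_⟩
      · simp only [List.foldl_cons]
        rw [h1, g1, List.append_assoc]
        cases n1 <;> cases n2 <;> simp
      · rw [← List.append_assoc]; exact g2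
      · intro y hy
        rcases List.mem_append.mp hy with hy | hy
        · exact ⟨(h3 y hy).1, u, List.mem_cons_self .., (h3 y hy).2⟩
        · obtain ⟨ha, u', hu', hadj⟩ := g3 y hy
          exact ⟨ha, u', List.mem_cons_of_mem _ hu', hadj⟩
      · intro u' hu' huc nb hnb hna
        rw [← List.append_assoc]
        rcases List.mem_cons.mp hu' with rfl | hu'
        · exact List.mem_append_left _ (h4 nb hnb hna)
        · exact g4 u' hu' (List.mem_append_left _ huc) nb hnb hna

-- saturation computes exactly the reachable set
theorem pvSat_go (a : List (Int × List Int)) (allowed : List Int) (start : Int)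
    (hnd : allowed.Nodup) :
    ∀ (f : Nat) (comp : List Int), comp.Nodup → (∀ x ∈ comp, x ∈ allowed) →
      start ∈ comp → (∀ x ∈ comp, pvReach a allowed start x) →
      allowed.length + 1 ≤ comp.length + f →
      (pvSatB a allowed f comp).Nodup ∧
      (∀ x, x ∈ pvSatB a allowed f comp ↔ pvReach a allowed start x) := by
  intro f
  induction f with
  | zero =>
      intro comp hcnd hsub hstart hreach hfuel
      have : comp.length ≤ allowed.length :=
        List.Subperm.length_le (List.subperm_of_subset hcnd hsub)
      omega
  | succ f ih =>
      intro comp hcnd hsub hstart hreach hfuel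
      obtain ⟨new, h1, h2, h3, h4⟩ := pvSatOuter_spec a allowed comp comp false hcnd
      have hstep : pvSatStepB a allowed comp = (comp ++ new, !new.isEmpty) := by
        rw [pvSatStepB, h1]
        simp
      cases new with
      | nil =>
          have hres : pvSatB a allowed (f + 1) comp = comp := by
            simp only [pvSatB, hstep]
            simp
          rw [hres]
          refine ⟨hcnd, fun x => ⟨hreach x, ?_⟩⟩
          intro hx
          induction hx with
          | base => exact hstart
          | step hr hadj hmemr ihr =>
              have := h4 _ ihr ihr _ hadj hmemr
              simpa using this
      | cons y ys =>
          have hres : pvSatB a allowed (f + 1) comp = pvSatB a allowed f (comp ++ y :: ys) := by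
            simp only [pvSatB, hstep]
            simp
          rw [hres]
          refine ih (comp ++ y :: ys) h2 ?_ (List.mem_append_left _ hstart) ?_ ?_
          · intro x hx
            rcases List.mem_append.mp hx with hx | hx
            · exact hsub x hx
            · exact (h3 x hx).1
          · intro x hx
            rcases List.mem_append.mp hx with hx | hx
            · exact hreach x hx
            · obtain ⟨ha, u, hu, hadj⟩ := h3 x hx
              exact pvReach.step (hreach u hu) hadj ha
          · simp only [List.length_append, List.length_cons]
            omega

theorem pvScore_step (score : Int) (n : Nat) :
    (if (n : Int) < 2 then score
     else if 8 ≤ (n : Int) then score + 23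
     else
       match PySem.Dict.get? (PySem.Dict.mk [((2:Int), (5:Int)), (3, 9), (4, 12), (5, 16), (6, 20), (7, 24)]) (n : Int) with
       | some v => score + v
       | none => score)
    = score + (if 8 ≤ (n : Int) then 23 else PySem.Dict.getD (PySem.Dict.mk pvTable) (n : Int) 0) := by
  by_cases h8 : 8 ≤ (n : Int)
  · rw [if_neg (by omega), if_pos h8, if_pos h8]
  · rw [if_neg h8]
    by_cases h2 : (n : Int) < 2
    · rw [if_pos h2]
      have hn : n = 0 ∨ n = 1 := by omega
      rcases hn with rfl | rfl <;>
        norm_num [PySem.Dict.getD, PySem.Dict.get?, PySem.Dict.mk, pvTable]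
    · rw [if_neg h2, if_neg h8]
      have hn2 : 2 ≤ n := by exact_mod_cast not_lt.mp h2
      have hn8 : n < 8 := by exact_mod_cast not_le.mp h8
      interval_cases n <;>
        norm_num [PySem.Dict.getD, PySem.Dict.get?, PySem.Dict.mk, pvTable]

theorem pvPeelEq (a : List (Int × List Int)) (hawks : List Int) (hnd : hawks.Nodup) :
    ∀ (rest done : List Int) (total : Int),
      hawks.filter (fun x => decide (x ∉ done)) = rest.filter (fun x => decide (x ∉ done)) →
      (pvFccA a (hawks.filter (fun x => decide (x ∉ done))).length
          (hawks.filter (fun x => decide (x ∉ done)))).foldl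
        (fun score comp =>
          let size : Int := (comp.length : Int)
          if size < 2 then score
          else if 8 ≤ size then score + 23
          else
            match PySem.Dict.get? (PySem.Dict.mk [((2:Int), (5:Int)), (3, 9), (4, 12), (5, 16), (6, 20), (7, 24)]) size with
            | some v => score + v
            | none => score)
        total
      = pvOuterB a hawks rest done total := by
  intro rest
  induction rest with
  | nil =>
      intro done total hfil
      rw [hfil]
      simp [pvFccA, pvOuterB]
  | cons h rest' ih =>
      intro done total hfil
      by_cases hdone : h ∈ done
      · have hh : (h :: rest').filter (fun x => decide (x ∉ done))
            = rest'.filter (fun x => decide (x ∉ done)) := by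
          simp [hdone]
        rw [hh] at hfil
        simp only [pvOuterB]
        rw [if_pos hdone]
        exact ih done total hfil
      · have hRfil : hawks.filter (fun x => decide (x ∉ done))
            = h :: rest'.filter (fun x => decide (x ∉ done)) := by
          rw [hfil]
          simp [hdone]
        set restF := rest'.filter (fun x => decide (x ∉ done)) with hrestF
        have hndR : (h :: restF).Nodup := by
          rw [← hRfil]; exact hnd.filter _
        have hmem1 : ∀ (q : List Int) (x y : Int), y ∈ q ++ [x] ↔ y = x ∨ y ∈ q := by
          intro q x y; simp [List.mem_append, or_comm]
        have hlen1 : ∀ (q : List Int) (x : Int), (q ++ [x]).length = q.length + 1 := by simp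
        obtain ⟨ndA, chA⟩ := pvTrav_char a h restF _ hmem1 hlen1 hndR
        set visited := pvTrav a (h :: restF) (fun q x => q ++ [x]) (restF.length + 1) [h] [h] with hvis
        obtain ⟨ndB, chB⟩ := pvSat_go a (h :: restF) h hndR (h :: restF).length [h]
          (List.nodup_singleton h)
          (by intro x hx; rw [List.mem_singleton] at hx; subst hx; exact List.mem_cons_self ..)
          (List.mem_singleton.mpr rfl)
          (by intro x hx; rw [List.mem_singleton] at hx; subst hx; exact pvReach.base)
          (by simp)
        set comp := pvSatB a (h :: restF) (h :: restF).length [h] with hcomp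
        have hiff : ∀ x, x ∈ comp ↔ x ∈ visited := fun x => (chB x).trans (chA x).symm
        have hlenBA : comp.length = visited.length :=
          ((List.perm_ext_iff_of_nodup ndB ndA).mpr hiff).length_eq
        have hA : h ∈ visited := (chA h).mpr pvReach.base
        have hB : h ∈ comp := (chB h).mpr pvReach.base
        have hrem : (h :: restF).filter (fun x => decide (x ∉ visited))
            = restF.filter (fun x => decide (x ∉ visited)) := by
          simp [hA]
        set done' := done ++ comp.filter (fun x => decide (x ∉ done)) with hdone'
        have hpt : ∀ x : Int, (decide (x ∉ done') : Bool)
            = (decide (x ∉ done) && decide (x ∉ comp)) := by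
          intro x
          by_cases h1 : x ∈ done <;> by_cases h2 : x ∈ comp <;>
            simp [hdone', List.mem_append, List.mem_filter, h1, h2]
        have hfa : ∀ l : List Int, l.filter (fun x => decide (x ∉ done'))
            = (l.filter (fun x => decide (x ∉ done))).filter (fun x => decide (x ∉ comp)) := by
          intro l
          rw [List.filter_filter]
          exact List.filter_congr (fun x _ => by rw [hpt x, Bool.and_comm])
        have hcv : ∀ l : List Int, l.filter (fun x => decide (x ∉ comp))
            = l.filter (fun x => decide (x ∉ visited)) :=
          fun l => List.filter_congr (fun x _ => decide_eq_decide.mpr (by rw [hiff x]))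
        have hAside : hawks.filter (fun x => decide (x ∉ done'))
            = restF.filter (fun x => decide (x ∉ visited)) := by
          rw [hfa, hRfil]
          simp only [List.filter_cons]
          rw [decide_eq_false (by simpa using hB)]
          simp only [Bool.false_eq_true, if_false]
          exact hcv restF
        have hBside : rest'.filter (fun x => decide (x ∉ done'))
            = restF.filter (fun x => decide (x ∉ visited)) := by
          rw [hfa, ← hrestF]
          exact hcv restF
        -- unfold one peel on both sides
        rw [hRfil]
        simp only [List.length_cons, pvFccA, pvBfsA_eq_trav, ← hvis, hrem]
        simp only [pvOuterB]
        rw [if_neg hdone]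
        simp only [hRfil, List.length_cons]
        rw [List.foldl_cons]
        simp only [PySem.List.length_sorted, ← hlenBA]
        rw [pvScore_step total comp.length]
        rw [pvFccA_fuel a restF.length restF.length _
          (List.length_filter_le _ _) (List.length_filter_le _ _)]
        have hih := ih done' (total + if 8 ≤ (comp.length : Int) then 23
          else PySem.Dict.getD (PySem.Dict.mk pvTable) (comp.length : Int) 0)
          (hAside.trans hBside.symm)
        rw [hAside] at hih
        rw [pvFccA_fuel a restF.length ((restF.filter
          (fun x => decide (x ∉ visited))).length) _
          (List.length_filter_le _ _) (le_refl _)] at hih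
        exact hih

theorem pvHawks_nodup (animals : List String) :
    (((PySem.List.enumerate animals 0).filter (fun p => p.2 == "hawk")).map
      (fun p => p.1)).Nodup := by
  have h1 : (PySem.List.enumerate animals 0).Pairwise (fun p q => p.1 < q.1) :=
    PySem.List.pairwise_lt_enumerate animals 0
  have h2 : ((PySem.List.enumerate animals 0).filter (fun p => p.2 == "hawk")).Pairwise
      (fun p q => p.1 < q.1) :=
    List.Pairwise.sublist List.filter_sublist h1
  have h3 : ((((PySem.List.enumerate animals 0).filter (fun p => p.2 == "hawk")).map
      (fun p => p.1))).Pairwise (· < ·) := List.pairwise_map.mpr h2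
  exact h3.imp ne_of_lt

-- ===== VERDICT =====
theorem score_hawks_spec : Claim_equal_score_hawks := by
  intro animals adjacency _
  show score_hawks animals adjacency = score_hawks_alt animals adjacency
  simp only [score_hawks, score_hawks_alt]
  by_cases h : (((PySem.List.enumerate animals 0).filter (fun p => p.2 == "hawk")).map
      (fun p => p.1) : List Int) = []
  · rw [if_pos h, h]
    rfl
  · rw [if_neg h]
    have hfil : (((PySem.List.enumerate animals 0).filter (fun p => p.2 == "hawk")).map
        (fun p => p.1)).filter (fun x => decide (x ∉ ([] : List Int)))
        = ((PySem.List.enumerate animals 0).filter (fun p => p.2 == "hawk")).map (fun p => p.1) := by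
      simp
    have := pvPeelEq adjacency _ (pvHawks_nodup animals)
      (((PySem.List.enumerate animals 0).filter (fun p => p.2 == "hawk")).map (fun p => p.1))
      [] 0 (by rw [hfil])
    rw [hfil] at this
    exact this
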